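-- pv_equiv track=rewrite | github.com/minhe7735/text-expander | scripts/gen_trie.py | escape_for_c_string
-- ===== SOURCE A (Python) =====
-- def escape_for_c_string(byte_data):
--     if byte_data is None: return ""
--     result = []
--     for byte in byte_data:
--         if byte == ord('"'): result.append('\\"')
--         elif byte == ord('\\'): result.append('\\\\')
--         elif byte == ord('\n'): result.append('\\n')
--         elif byte == ord('\t'): result.append('\\t')
--         elif byte == ord('\r'): result.append('\\r')
--         elif 32 <= byte <= 126: result.append(chr(byte))
--         else: result.append(f'\\{byte:03o}')
--     return "".join(result)
-- ===== SOURCE B (Python) =====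
-- _SPECIAL = {34: '\\"', 92: '\\\\', 10: '\\n', 9: '\\t', 13: '\\r'}
--
-- def escape_for_c_string(byte_data):
--     if byte_data is None:
--         return ""
--     out = []
--     i, n = 0, len(byte_data)
--     while i < n:
--         # scan a maximal run of directly-representable bytes and emit it wholesale
--         j = i
--         while j < n and 32 <= byte_data[j] <= 126 and byte_data[j] != 34 and byte_data[j] != 92:
--             j += 1
--         if i < j:
--             out.append(''.join(map(chr, byte_data[i:j])))
--             i = j
--         else:
--             b = byte_data[i]
--             out.append(_SPECIAL.get(b) or f'\\{b:03o}')
--             i += 1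
--     return ''.join(out)
-- ===== Notes on version B (the rewrite author's own statement) =====
-- stated objective: alternative
-- what changed: B is a two-pointer run scanner: it finds each maximal run of directly-representable bytes and emits the whole run as one chunk, handling the single special/escaped byte between runs via a dict of named escapes with an octal fallback, instead of A's per-byte five-way branch appended one character at a time.
import Mathlib
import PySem

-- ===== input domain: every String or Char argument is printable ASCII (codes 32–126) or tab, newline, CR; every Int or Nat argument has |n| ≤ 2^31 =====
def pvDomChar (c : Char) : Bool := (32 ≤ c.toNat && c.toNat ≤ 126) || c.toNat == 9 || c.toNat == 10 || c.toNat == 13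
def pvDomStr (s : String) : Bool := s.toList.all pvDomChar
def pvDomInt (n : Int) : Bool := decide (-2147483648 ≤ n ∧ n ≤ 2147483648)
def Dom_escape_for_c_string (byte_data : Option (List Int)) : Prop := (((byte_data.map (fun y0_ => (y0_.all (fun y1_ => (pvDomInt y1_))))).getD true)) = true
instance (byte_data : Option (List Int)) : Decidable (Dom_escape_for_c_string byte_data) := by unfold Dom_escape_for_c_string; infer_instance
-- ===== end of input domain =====

-- B is a two-pointer run scanner: it emits each maximal run of directly-representable
-- bytes as one chunk and handles the single escaped byte between runs via a dict of
-- named escapes with an octal fallback; objective: alternative, same result.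

-- ===== PORT A =====
-- exact port of Python's f'{b:03o}': octal digits zero-padded to width 3, sign included in the width
def pvOctFmt (b : Int) : String :=
  if b < 0 then String.ofList ('-' :: List.replicate (2 - (Nat.toDigits 8 (-b).toNat).length) '0' ++ Nat.toDigits 8 (-b).toNat)
  else String.ofList (List.replicate (3 - (Nat.toDigits 8 b.toNat).length) '0' ++ Nat.toDigits 8 b.toNat)

def escape_for_c_string (byte_data : Option (List Int)) : String :=
  match byte_data with
  | none => ""
  | some bs =>
    let result := bs.foldl (fun result byte =>
      result ++ [if byte = 34 then "\\\""
        else if byte = 92 then "\\\\"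
        else if byte = 10 then "\\n"
        else if byte = 9 then "\\t"
        else if byte = 13 then "\\r"
        else if 32 ≤ byte ∧ byte ≤ 126 then String.ofList [Char.ofNat byte.toNat]
        else "\\" ++ pvOctFmt byte]) []
    String.join result

-- ===== PORT B =====
def escSpecial : PySem.Dict Int String :=
  PySem.Dict.ofList [(34, "\\\""), (92, "\\\\"), (10, "\\n"), (9, "\\t"), (13, "\\r")]

-- inner while: advance j over the maximal run of directly-representable bytes
-- (fuel only makes the recursion structural: the loop stops at j = n, so fuel = n is enough;
-- byte_data[j] is guarded by j < n, so pyGetD's default is never used)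
def escRunEnd (bs : List Int) (n : Nat) : Nat → Nat → Nat
  | 0, j => j
  | fuel+1, j =>
    if j < n ∧ (32 ≤ PySem.List.pyGetD bs (j:Int) 0 ∧ PySem.List.pyGetD bs (j:Int) 0 ≤ 126
        ∧ PySem.List.pyGetD bs (j:Int) 0 ≠ 34 ∧ PySem.List.pyGetD bs (j:Int) 0 ≠ 92) then
      escRunEnd bs n fuel (j+1)
    else j

-- outer while over i (fuel = n suffices: i advances by at least 1 each iteration);
-- '_SPECIAL.get(b) or octal' is a default lookup since every stored escape is non-empty
def escLoop (bs : List Int) (n : Nat) : Nat → Nat → List String → List String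
  | 0, _, out => out
  | fuel+1, i, out =>
    if i < n then
      let j := escRunEnd bs n n i
      if i < j then
        escLoop bs n fuel j (out ++ [String.ofList ((PySem.List.slice bs (some (i:Int)) (some (j:Int))).map (fun b => Char.ofNat b.toNat))])
      else
        let b := PySem.List.pyGetD bs (i:Int) 0
        escLoop bs n fuel (i+1) (out ++ [(escSpecial.get? b).getD ("\\" ++ pvOctFmt b)])
    else out

def escape_for_c_string_alt (byte_data : Option (List Int)) : String :=
  match byte_data with
  | none => ""
  | some bs => String.join (escLoop bs bs.length bs.length 0 [])

-- ===== PRECONDITION & SPEC =====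
def Spec_escape_for_c_string (byte_data : Option (List Int)) (out : String) : Prop := out = escape_for_c_string_alt byte_data
instance (byte_data : Option (List Int)) (out : String) : Decidable (Spec_escape_for_c_string byte_data out) := by unfold Spec_escape_for_c_string; infer_instance

-- ===== CLAIM (what is proved, stated in full; the proofs are below) =====
def Claim_equal_escape_for_c_string : Prop := ∀ (byte_data : Option (List Int)), Dom_escape_for_c_string byte_data → Spec_escape_for_c_string byte_data (escape_for_c_string byte_data)

-- ===== LEMMAS AND PROOFS =====

-- A's per-byte escape, named for the proofs
def escA (byte : Int) : String :=
  if byte = 34 then "\\\""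
  else if byte = 92 then "\\\\"
  else if byte = 10 then "\\n"
  else if byte = 9 then "\\t"
  else if byte = 13 then "\\r"
  else if 32 ≤ byte ∧ byte ≤ 126 then String.ofList [Char.ofNat byte.toNat]
  else "\\" ++ pvOctFmt byte

-- B's run predicate, named for the proofs
def escPlainB (b : Int) : Bool := decide (32 ≤ b ∧ b ≤ 126 ∧ b ≠ 34 ∧ b ≠ 92)

lemma A_eq_map (bs : List Int) : escape_for_c_string (some bs) = String.join (bs.map escA) := by
  simp only [escape_for_c_string, PySem.List.foldl_append_singleton_eq_map, List.nil_append]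
  rfl

lemma joinFrom (l : List String) (a : String) : l.foldl (·++·) a = a ++ String.join l := by
  induction l generalizing a with
  | nil => simp [String.join]
  | cons h t ih =>
    show List.foldl (·++·) (a ++ h) t = a ++ String.join (h :: t)
    rw [ih, show String.join (h :: t) = List.foldl (·++·) h t from rfl, ih h, String.append_assoc]

lemma join_append (l1 l2 : List String) : String.join (l1 ++ l2) = String.join l1 ++ String.join l2 := by
  show List.foldl (·++·) "" (l1 ++ l2) = _
  rw [List.foldl_append, joinFrom]; rfl

lemma join_cons (x : String) (l : List String) : String.join (x :: l) = x ++ String.join l := by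
  show List.foldl (·++·) "" (x :: l) = _
  rw [List.foldl_cons, joinFrom]
  simp

lemma join_singleton (x : String) : String.join [x] = x := by
  show List.foldl (·++·) "" [x] = x
  simp

lemma escA_plain {b : Int} (h : escPlainB b = true) : escA b = String.ofList [Char.ofNat b.toNat] := by
  simp only [escPlainB, decide_eq_true_eq] at h
  obtain ⟨h1, h2, h3, h4⟩ := h
  simp [escA, h3, h4, h1, h2, show b ≠ 10 by omega, show b ≠ 9 by omega, show b ≠ 13 by omega]

lemma escA_nonplain {b : Int} (h : escPlainB b = false) :
    escA b = (escSpecial.get? b).getD ("\\" ++ pvOctFmt b) := by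
  simp only [escPlainB, decide_eq_false_iff_not, not_and_or, not_not] at h
  by_cases h34 : b = 34
  · subst h34; rfl
  by_cases h92 : b = 92
  · subst h92; rfl
  by_cases h10 : b = 10
  · subst h10; rfl
  by_cases h9 : b = 9
  · subst h9; rfl
  by_cases h13 : b = 13
  · subst h13; rfl
  have hnp : ¬ (32 ≤ b ∧ b ≤ 126) := by
    rcases h with h | h | h | h <;> omega
  have hget : escSpecial.get? b = none := by
    have hd : escSpecial = PySem.Dict.mk [(34, "\\\""), (92, "\\\\"), (10, "\\n"), (9, "\\t"), (13, "\\r")] := by rfl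
    rw [hd]
    simp [PySem.Dict.get?, Ne.symm h34, Ne.symm h92, Ne.symm h10, Ne.symm h9, Ne.symm h13]
  simp [escA, h34, h92, h10, h9, h13, hnp, hget]

lemma join_singletons (t : List Int) (hp : ∀ b ∈ t, escPlainB b = true) :
    String.join (t.map escA) = String.ofList (t.map (fun b => Char.ofNat b.toNat)) := by
  induction t with
  | nil => rfl
  | cons x xs ih =>
    have hx := hp x (by simp)
    rw [List.map_cons, List.map_cons, join_cons, ih (fun b hb => hp b (by simp [hb])), escA_plain hx]
    apply String.ext; simp

lemma runEnd_eq (bs : List Int) : ∀ (fuel j : Nat), bs.length - j ≤ fuel → j ≤ bs.length →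
    escRunEnd bs bs.length fuel j = j + ((bs.drop j).takeWhile escPlainB).length := by
  intro fuel
  induction fuel with
  | zero =>
    intro j hf hj
    have hj' : j = bs.length := by omega
    simp [escRunEnd, hj']
  | succ fuel ih =>
    intro j hf hj
    by_cases hjlt : j < bs.length
    · have hget : PySem.List.pyGetD bs (j:Int) 0 = bs[j] := by
        simp [PySem.List.pyGetD_natCast, hjlt]
      have hdrop : bs.drop j = bs[j] :: bs.drop (j+1) := List.drop_eq_getElem_cons hjlt
      by_cases hp : escPlainB bs[j] = true
      · have hp' := hp
        simp only [escPlainB, decide_eq_true_eq] at hp'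
        rw [escRunEnd, if_pos ⟨hjlt, by rw [hget]; exact ⟨hp'.1, hp'.2.1, hp'.2.2.1, hp'.2.2.2⟩⟩,
          ih (j+1) (by omega) (by omega), hdrop, List.takeWhile_cons, if_pos hp]
        simp
        omega
      · rw [escRunEnd, if_neg (by
          rw [hget]
          simp only [escPlainB, decide_eq_true_eq] at hp
          intro hcon
          exact hp ⟨hcon.2.1, hcon.2.2.1, hcon.2.2.2.1, hcon.2.2.2.2⟩),
          hdrop, List.takeWhile_cons, if_neg hp]
        simp
    · have hj' : j = bs.length := by omega
      rw [escRunEnd, if_neg (by omega)]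
      simp [hj']

lemma loop_eq (bs : List Int) : ∀ (fuel k : Nat) (acc : List String), bs.length - k ≤ fuel → k ≤ bs.length →
    String.join (escLoop bs bs.length fuel k acc) = String.join acc ++ String.join ((bs.drop k).map escA) := by
  intro fuel
  induction fuel with
  | zero =>
    intro k acc hf hk
    have hk' : k = bs.length := by omega
    simp [escLoop, hk', String.join]
  | succ fuel ih =>
    intro k acc hf hk
    by_cases hlt : k < bs.length
    · set t := (bs.drop k).takeWhile escPlainB with ht
      set r := (bs.drop k).dropWhile escPlainB with hr
      have htr : bs.drop k = t ++ r := (List.takeWhile_append_dropWhile).symm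
      have hre : escRunEnd bs bs.length bs.length k = k + t.length :=
        runEnd_eq bs bs.length k (by omega) (by omega)
      have htle : t.length ≤ bs.length - k := by
        have h1 := (List.takeWhile_prefix (p := escPlainB) (l := bs.drop k)).length_le
        rw [List.length_drop] at h1
        omega
      have hdropj : bs.drop (k + t.length) = r := by
        have : bs.drop (k + t.length) = (bs.drop k).drop t.length := by
          rw [List.drop_drop]
        rw [this, htr, List.drop_left]
      by_cases hrun : 0 < t.length
      · rw [escLoop, if_pos hlt]
        simp only [hre]
        rw [if_pos (by omega)]
        have hslice : PySem.List.slice bs (some (k:Int)) (some ((k + t.length : Nat):Int)) = t := by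
          rw [PySem.List.slice_natCast]
          have : k + t.length - k = t.length := by omega
          rw [this, htr, List.take_left]
        have hrec := ih (k + t.length)
          (acc ++ [String.ofList (t.map (fun b => Char.ofNat b.toNat))]) (by omega) (by omega)
        rw [hslice, hrec, hdropj, join_append, htr, List.map_append, join_append,
          join_singletons t (fun b hb => List.mem_takeWhile_imp hb),
          join_singleton, String.append_assoc]
      · have ht0 : t = [] := List.length_eq_zero_iff.mp (by omega)
        rw [escLoop, if_pos hlt]
        simp only [hre, ht0, List.length_nil, Nat.add_zero]
        rw [if_neg (by omega)]
        have hget : PySem.List.pyGetD bs (k:Int) 0 = bs[k] := by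
          simp [PySem.List.pyGetD_natCast, hlt]
        have hdropk : bs.drop k = bs[k] :: bs.drop (k+1) := List.drop_eq_getElem_cons hlt
        have hnp : escPlainB bs[k] = false := by
          by_contra hcon
          have hc : escPlainB bs[k] = true := by
            cases hcb : escPlainB bs[k] with
            | false => exact absurd hcb hcon
            | true => rfl
          rw [ht] at ht0
          rw [hdropk, List.takeWhile_cons, if_pos hc] at ht0
          simp at ht0
        have hrec := ih (k+1)
          (acc ++ [(escSpecial.get? (PySem.List.pyGetD bs (k:Int) 0)).getD ("\\" ++ pvOctFmt (PySem.List.pyGetD bs (k:Int) 0))]) (by omega) (by omega)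
        rw [hrec, hdropk, List.map_cons, join_append, join_singleton, hget, escA_nonplain hnp,
          join_cons, String.append_assoc]
    · have hk' : k = bs.length := by omega
      rw [escLoop, if_neg (by omega)]
      simp [hk', String.join]

-- ===== VERDICT (by name: the statement is the Claim_ definition above) =====
theorem escape_for_c_string_spec : Claim_equal_escape_for_c_string := by
  intro byte_data _
  unfold Spec_escape_for_c_string
  cases byte_data with
  | none => rfl
  | some bs =>
    rw [A_eq_map, escape_for_c_string_alt, loop_eq bs bs.length 0 [] (by omega) (by omega)]
    simp [String.join]
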